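-- pv_equiv track=rewrite | github.com/Vsevalot/MyPython | PycharmProjects/MBIC/EEG_Analysis/ABP.py | get_patient_name
-- ===== SOURCE A (Python) =====
-- def get_patient_name(path):
--     slash=0
--     reverse_name=''
--     for i in range(len(path)-1,-1,-1):
--         if (path[i]=='/' or path[i]=='\\' ):
--             slash+=1
--             continue
--         if (slash == 1):
--             reverse_name+=path[i]
--         if (slash == 2):
--             break
--     name=''
--     for i in range(len(reverse_name) - 1, -1, -1):
--         name+=reverse_name[i]
--     return name
-- ===== SOURCE B (Python) =====
-- def get_patient_name(path):
--     prev = None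
--     cur = ''
--     for ch in path:
--         if ch == '/' or ch == '\\':
--             prev, cur = cur, ''
--         else:
--             cur += ch
--     return prev if prev is not None else ''
-- ===== Notes on version B (the rewrite author's own statement) =====
-- stated objective: simpler
-- what changed: Replaces the backward index scan with a slash counter, a break, and a second string-reversal loop by a single forward pass that keeps only the last two path segments (previous, current) and returns the previous one.
import Mathlib
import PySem

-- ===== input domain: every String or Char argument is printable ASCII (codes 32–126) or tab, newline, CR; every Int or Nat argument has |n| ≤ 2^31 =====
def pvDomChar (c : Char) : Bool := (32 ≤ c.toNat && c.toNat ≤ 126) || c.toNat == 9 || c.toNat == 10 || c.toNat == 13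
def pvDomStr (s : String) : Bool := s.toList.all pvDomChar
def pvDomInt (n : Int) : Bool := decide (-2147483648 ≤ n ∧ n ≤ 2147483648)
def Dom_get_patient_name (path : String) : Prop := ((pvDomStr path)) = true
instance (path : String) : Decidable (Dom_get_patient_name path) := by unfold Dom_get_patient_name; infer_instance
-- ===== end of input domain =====

-- B replaces A's backward scan with slash counter + reversal loop by one forward
-- pass keeping only the last two segments; return value equivalence is proved.

def pvSep (c : Char) : Bool := c == '/' || c == '\\'

-- ===== PORT A =====
-- A's first loop 'for i in range(len(path)-1,-1,-1)' visits the characters in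
-- reverse order; ported as structural recursion over path.toList.reverse with
-- the same state (slash counter, collected reverse_name); 'break' = return.
def pvLoopA : List Char → Int → List Char → List Char
  | [], _, rev => rev
  | c :: rest, slash, rev =>
    if pvSep c then pvLoopA rest (slash + 1) rev
    else if slash = 1 then pvLoopA rest slash (rev ++ [c])
    else if slash = 2 then rev
    else pvLoopA rest slash rev

-- A's second loop: name += reverse_name[i] for i from the end down.
def pvRevLoop : List Char → List Char → List Char
  | [], name => name
  | c :: rest, name => pvRevLoop rest (name ++ [c])

def get_patient_name (path : String) : String :=
  String.mk (pvRevLoop (pvLoopA path.toList.reverse 0 []).reverse [])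

-- ===== PORT B =====
-- Source B: one forward pass; state (prev, cur); a separator promotes cur to prev.
def pvLoopB : List Char → Option (List Char) × List Char → Option (List Char) × List Char
  | [], st => st
  | c :: rest, (prev, cur) =>
    if pvSep c then pvLoopB rest (some cur, [])
    else pvLoopB rest (prev, cur ++ [c])

def get_patient_name_alt (path : String) : String :=
  match (pvLoopB path.toList (none, [])).1 with
  | some p => String.mk p
  | none => ""

-- ===== PRECONDITION & SPEC =====
def Spec_get_patient_name (path : String) (out : String) : Prop := out = get_patient_name_alt path
instance (path : String) (out : String) : Decidable (Spec_get_patient_name path out) := by unfold Spec_get_patient_name; infer_instance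

-- ===== CLAIM (what is proved, stated in full; the proofs are below) =====
def Claim_equal_get_patient_name : Prop := ∀ (path : String), Dom_get_patient_name path → Spec_get_patient_name path (get_patient_name path)

-- ===== LEMMAS AND PROOFS =====

-- the segment after the last separator, as seen on the reversed list
def pvSeg1 (r : List Char) : List Char := r.takeWhile (fun c => !pvSep c)
-- the segment between the last two separators (none if no separator)
def pvSeg2 (r : List Char) : Option (List Char) :=
  match r.dropWhile (fun c => !pvSep c) with
  | [] => none
  | _ :: t => some (t.takeWhile (fun c => !pvSep c))

theorem pvRevLoop_eq (l acc : List Char) : pvRevLoop l acc = acc ++ l := by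
  induction l generalizing acc with
  | nil => simp [pvRevLoop]
  | cons c rest ih => simp [pvRevLoop, ih]

theorem pvLoopA_ge2 (l : List Char) (k : Int) (acc : List Char) (hk : 2 ≤ k) :
    pvLoopA l k acc = acc := by
  induction l generalizing k with
  | nil => rfl
  | cons c rest ih =>
    by_cases hs : pvSep c
    · simp only [pvLoopA, hs, if_pos]
      exact ih (k + 1) (by omega)
    · simp only [pvLoopA, hs, Bool.false_eq_true, if_neg, if_false]
      have h1 : ¬ k = 1 := by omega
      by_cases h2 : k = 2
      · simp [h1, h2]
      · simp only [h1, h2, if_false]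
        exact ih k hk

theorem pvLoopA_one (l acc : List Char) :
    pvLoopA l 1 acc = acc ++ l.takeWhile (fun c => !pvSep c) := by
  induction l generalizing acc with
  | nil => simp [pvLoopA]
  | cons c rest ih =>
    by_cases hs : pvSep c
    · simp only [pvLoopA, hs, if_pos, List.takeWhile_cons]
      rw [pvLoopA_ge2 rest (1 + 1) acc (by omega)]
      simp [hs]
    · simp only [pvLoopA, hs, Bool.false_eq_true, if_false, if_pos, List.takeWhile_cons]
      rw [ih (acc ++ [c])]
      simp [hs]

theorem pvLoopA_zero (r : List Char) :
    pvLoopA r 0 [] = (pvSeg2 r).getD [] := by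
  induction r with
  | nil => rfl
  | cons c rest ih =>
    by_cases hs : pvSep c
    · simp only [pvLoopA, hs, if_pos, zero_add]
      rw [pvLoopA_one rest []]
      simp [pvSeg2, List.dropWhile_cons, hs]
    · simp only [pvLoopA, hs, Bool.false_eq_true, if_false]
      norm_num
      rw [ih]
      simp [pvSeg2, List.dropWhile_cons, hs]

theorem pvLoopB_append (l1 l2 : List Char) (st : Option (List Char) × List Char) :
    pvLoopB (l1 ++ l2) st = pvLoopB l2 (pvLoopB l1 st) := by
  induction l1 generalizing st with
  | nil => rfl
  | cons c rest ih =>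
    obtain ⟨prev, cur⟩ := st
    by_cases hs : pvSep c <;> simp [pvLoopB, hs, ih]

theorem pvLoopB_char (r : List Char) :
    pvLoopB r.reverse (none, []) = ((pvSeg2 r).map List.reverse, (pvSeg1 r).reverse) := by
  induction r with
  | nil => rfl
  | cons c rest ih =>
    simp only [List.reverse_cons, pvLoopB_append, ih]
    by_cases hs : pvSep c
    · simp [pvLoopB, hs, pvSeg1, pvSeg2, List.dropWhile_cons, List.takeWhile_cons]
    · simp [pvLoopB, hs, pvSeg1, pvSeg2, List.dropWhile_cons, List.takeWhile_cons]

-- ===== VERDICT (by name: the statement is the Claim_ definition above) =====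
theorem get_patient_name_spec : Claim_equal_get_patient_name := by
  intro path _
  unfold Spec_get_patient_name get_patient_name get_patient_name_alt
  rw [pvRevLoop_eq, pvLoopA_zero]
  conv_rhs => rw [← List.reverse_reverse path.toList]
  rw [pvLoopB_char]
  cases h : pvSeg2 path.toList.reverse <;> simp [h] <;> rfl
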